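-- pv_equiv track=rewrite | github.com/Clean-Code0244/PythonCodeStepByStepSolutions | PythonCodeStepByStep/collections/list/flip_half.py | flip_half
-- ===== SOURCE A (Python) =====
-- def flip_half(liste):
--     odd_list = []
--     even_list = []
--     for i in range(len(liste)):
--         if i % 2==0:
--             even_list.append(liste[i])
--         else:
--             odd_list.append(liste[i])
--
--     reverse = []
--     for i in range(len(even_list)-1,-1,-1):
--         reverse.append(even_list[i])
--     for i in range(len(liste)):
--         if i % 2 == 0:
--             liste[i] = reverse.pop()
--         else:
--             liste[i] = odd_list.pop()
--     return liste
-- ===== SOURCE B (Python) =====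
-- def flip_half(liste):
--     n = len(liste)
--     last_odd = n - 1 - n % 2
--     return [x if k % 2 == 0 else liste[last_odd + 1 - k] for k, x in enumerate(liste)]
-- ===== Notes on version B (the rewrite author's own statement) =====
-- stated objective: simpler
-- what changed: A splits the list into even/odd-index aux lists, builds an explicit reversal of the evens, then rewrites every slot by popping from both stacks; B rebuilds the result in a single enumerate pass, keeping even-index elements and fetching each odd-index element directly from its mirrored odd index (last_odd + 1 - k). B returns a fresh list instead of mutating the argument in place (the return value is identical).
import Mathlib
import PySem

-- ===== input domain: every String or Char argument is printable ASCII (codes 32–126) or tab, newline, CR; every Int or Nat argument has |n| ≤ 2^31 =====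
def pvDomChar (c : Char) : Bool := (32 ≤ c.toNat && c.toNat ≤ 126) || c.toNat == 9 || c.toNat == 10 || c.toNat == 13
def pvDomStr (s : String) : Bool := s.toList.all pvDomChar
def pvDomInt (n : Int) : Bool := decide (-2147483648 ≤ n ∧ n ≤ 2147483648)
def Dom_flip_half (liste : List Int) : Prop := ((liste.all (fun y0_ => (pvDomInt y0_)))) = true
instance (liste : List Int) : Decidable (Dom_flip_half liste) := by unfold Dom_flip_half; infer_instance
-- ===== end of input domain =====

-- B rebuilds the list in one pass with mirror-index arithmetic instead of A's three
-- collect/reverse/pop loops (objective: simpler). A mutates its argument in place and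
-- returns it; B returns a fresh list — the equivalence proved here is about the return value.

-- ===== PORT A =====
-- first loop: split into even_list / odd_list by index parity
def flipLoop1 (liste : List Int) (i : Nat) (ev od : List Int) : List Int × List Int :=
  if h : i < liste.length then
    if i % 2 == 0 then flipLoop1 liste (i+1) (ev ++ [liste[i]]) od
    else flipLoop1 liste (i+1) ev (od ++ [liste[i]])
  else (ev, od)
termination_by liste.length - i

-- second loop: for i in range(len(even_list)-1, -1, -1): reverse.append(even_list[i])
-- (k = i+1 counts the remaining iterations; index used is k-1, descending)
def flipLoop2 (ev : List Int) : Nat → List Int → List Int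
  | 0, rev => rev
  | k+1, rev => flipLoop2 ev k (rev ++ [ev.getD k 0])

-- third loop: liste[i] = reverse.pop() / odd_list.pop()  (pop from the end; never empty here)
def flipLoop3 (i : Nat) (cur rev odd : List Int) : List Int :=
  if h : i < cur.length then
    if i % 2 == 0 then
      flipLoop3 (i+1) (cur.set i (rev.getLast?.getD 0)) rev.dropLast odd
    else
      flipLoop3 (i+1) (cur.set i (odd.getLast?.getD 0)) rev odd.dropLast
  else cur
termination_by cur.length - i
decreasing_by all_goals simp [List.length_set]; omega

def flip_half (liste : List Int) : List Int :=
  let p := flipLoop1 liste 0 [] []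
  let rev := flipLoop2 p.1 p.1.length []
  flipLoop3 0 liste rev p.2

-- ===== PORT B =====
def flip_half_alt (liste : List Int) : List Int :=
  let n : Int := liste.length
  let lastOdd : Int := n - 1 - PySem.Int.mod n 2
  (PySem.List.enumerate liste).map (fun kx =>
    if PySem.Int.mod kx.1 2 == 0 then kx.2
    else PySem.List.pyGetD liste (lastOdd + 1 - kx.1) 0)

-- ===== PRECONDITION & SPEC =====
def Spec_flip_half (liste : List Int) (out : List Int) : Prop := out = flip_half_alt liste
instance (liste : List Int) (out : List Int) : Decidable (Spec_flip_half liste out) := by unfold Spec_flip_half; infer_instance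

-- ===== CLAIM (what is proved, stated in full; the proofs are below) =====
def Claim_equal_flip_half : Prop := ∀ (liste : List Int), Dom_flip_half liste → Spec_flip_half liste (flip_half liste)

-- ===== LEMMAS AND PROOFS =====

-- elements at even (true) / odd (false) positions
def splitP : Bool → List Int → List Int
  | _, [] => []
  | true, x :: xs => x :: splitP false xs
  | false, _ :: xs => splitP true xs

-- replace the odd-position elements by the given values (left to right)
def setOdds : List Int → List Int → List Int
  | [], _ => []
  | [x], _ => [x]
  | x :: y :: xs, [] => x :: y :: setOdds xs []
  | x :: _ :: xs, v :: vs => x :: v :: setOdds xs vs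

-- what flipLoop3 writes onto a suffix, popping R at even and D at odd positions
def sb : Bool → List Int → List Int → List Int → List Int
  | _, [], _, _ => []
  | true, _ :: xs, R, D => (R.getLast?.getD 0) :: sb false xs R.dropLast D
  | false, _ :: xs, R, D => (D.getLast?.getD 0) :: sb true xs R D.dropLast

theorem set_take (l : List Int) (i : Nat) (v : Int) (h : i < l.length) :
    (l.set i v).take (i+1) = l.take i ++ [v] := by
  rw [List.set_eq_take_append_cons_drop, if_pos h, List.take_append]
  simp [List.length_take, Nat.min_eq_left h.le]

theorem set_drop (l : List Int) (i : Nat) (v : Int) (h : i < l.length) :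
    (l.set i v).drop (i+1) = l.drop (i+1) := by
  rw [List.set_eq_take_append_cons_drop, if_pos h, List.drop_append]
  simp [List.length_take, Nat.min_eq_left h.le]

theorem rev_last (l : List Int) (h : l ≠ []) :
    l.reverse = l.getLast h :: l.dropLast.reverse := by
  conv_lhs => rw [← List.dropLast_append_getLast h]
  simp

theorem flipLoop1_eq (liste : List Int) (i : Nat) (ev od : List Int) :
    flipLoop1 liste i ev od =
      if i % 2 = 0 then (ev ++ splitP true (liste.drop i), od ++ splitP false (liste.drop i))
      else (ev ++ splitP false (liste.drop i), od ++ splitP true (liste.drop i)) := by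
  by_cases h : i < liste.length
  · rw [flipLoop1, dif_pos h, List.drop_eq_getElem_cons h]
    have h2 := flipLoop1_eq liste (i+1) -- IH
    by_cases hp : i % 2 = 0
    · have hp1 : (i+1) % 2 ≠ 0 := by omega
      rw [if_pos (by simp [hp] : (i % 2 == 0) = true), if_pos hp]
      rw [h2 (ev ++ [liste[i]]) od, if_neg hp1]
      simp [splitP, List.append_assoc]
    · have hp1 : (i+1) % 2 = 0 := by omega
      rw [if_neg (by simp [hp] : ¬ (i % 2 == 0) = true), if_neg hp]
      rw [h2 ev (od ++ [liste[i]]), if_pos hp1]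
      simp [splitP, List.append_assoc]
  · rw [flipLoop1, dif_neg h, List.drop_eq_nil_of_le (by omega)]
    simp [splitP]
termination_by liste.length - i

theorem flipLoop2_eq (ev : List Int) (k : Nat) (rev : List Int) (hk : k ≤ ev.length) :
    flipLoop2 ev k rev = rev ++ (ev.take k).reverse := by
  induction k generalizing rev with
  | zero => simp [flipLoop2]
  | succ k ih =>
    have hlt : k < ev.length := by omega
    rw [flipLoop2, ih _ (by omega), List.getD_eq_getElem _ _ hlt,
      List.take_succ_eq_append_getElem hlt, List.reverse_append]
    simp [List.append_assoc]

theorem flipLoop3_eq (i : Nat) (cur R D : List Int) :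
    flipLoop3 i cur R D = cur.take i ++ sb (i % 2 == 0) (cur.drop i) R D := by
  by_cases h : i < cur.length
  · rw [flipLoop3, dif_pos h]
    by_cases hp : i % 2 = 0
    · have hb0 : (i % 2 == 0) = true := by simp [hp]
      have hb1 : ((i+1) % 2 == 0) = false := by simp; omega
      rw [if_pos hb0]
      have := flipLoop3_eq (i+1) (cur.set i (R.getLast?.getD 0)) R.dropLast D
      rw [this, set_take _ _ _ h, set_drop _ _ _ h,
        List.drop_eq_getElem_cons h, hb0, hb1]
      simp [sb, List.append_assoc]
    · have hb0 : (i % 2 == 0) = false := by simp [hp]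
      have hb1 : ((i+1) % 2 == 0) = true := by simp; omega
      rw [if_neg (by simp [hb0])]
      have := flipLoop3_eq (i+1) (cur.set i (D.getLast?.getD 0)) R D.dropLast
      rw [this, set_take _ _ _ h, set_drop _ _ _ h,
        List.drop_eq_getElem_cons h, hb0, hb1]
      simp [sb, List.append_assoc]
  · rw [flipLoop3, dif_neg h, List.drop_eq_nil_of_le (by omega), List.take_of_length_le (by omega)]
    simp [sb]
termination_by cur.length - i
decreasing_by all_goals simp [List.length_set]; omega

-- sb over the whole list, with the reversed evens and the (unreversed) odds, is setOdds
theorem sb_eq_setOdds : ∀ (l D : List Int), D.length = (splitP false l).length →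
    sb true l (splitP true l).reverse D = setOdds l D.reverse
  | [], D, _ => by simp [sb, setOdds]
  | [x], D, _ => by simp [sb, splitP, setOdds]
  | x :: y :: xs, D, hD => by
    have hDne : D ≠ [] := by
      intro hnil; rw [hnil] at hD; simp [splitP] at hD
    have hrev : D.reverse = D.getLast hDne :: D.dropLast.reverse := rev_last D hDne
    have ih := sb_eq_setOdds xs D.dropLast (by
      rw [List.length_dropLast, hD]; simp [splitP])
    simp only [splitP, sb, List.reverse_cons]
    rw [List.getLast?_concat, List.dropLast_concat]
    simp only [Option.getD_some]
    rw [hrev]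
    simp only [setOdds]
    rw [← ih]
    simp [List.getLast?_eq_some_getLast hDne]

theorem length_setOdds : ∀ (l vs : List Int), (setOdds l vs).length = l.length
  | [], _ => rfl
  | [_], _ => rfl
  | _ :: _ :: xs, [] => by simp [setOdds, length_setOdds xs []]
  | _ :: _ :: xs, _ :: vs => by simp [setOdds, length_setOdds xs vs]

theorem getElem_setOdds : ∀ (l vs : List Int) (p : Nat) (hp : p < l.length),
    (setOdds l vs)[p]'(by rw [length_setOdds]; exact hp) =
      if hpar : p % 2 = 0 then l[p]
      else if h2 : p / 2 < vs.length then vs[p / 2] else l[p]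
  | [x], vs, 0, _ => by simp [setOdds]
  | x :: y :: xs, [], 0, _ => by simp [setOdds]
  | x :: y :: xs, [], 1, _ => by simp [setOdds]
  | x :: y :: xs, [], p+2, hp => by
    have ihp := getElem_setOdds xs [] p (by simpa using hp)
    simp only [setOdds, List.getElem_cons_succ]
    rw [ihp]
    have h1 : (p+2) % 2 = p % 2 := by omega
    rw [h1]
    by_cases hpar : p % 2 = 0
    · simp [hpar]
    · rw [dif_neg hpar, dif_neg hpar, dif_neg (by simp), dif_neg (by simp)]
  | x :: y :: xs, v :: vs, 0, _ => by simp [setOdds]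
  | x :: y :: xs, v :: vs, 1, _ => by simp [setOdds]
  | x :: y :: xs, v :: vs, p+2, hp => by
    have ihp := getElem_setOdds xs vs p (by simpa using hp)
    simp only [setOdds, List.getElem_cons_succ]
    rw [ihp]
    have h1 : (p+2) % 2 = p % 2 := by omega
    rw [h1]
    by_cases hpar : p % 2 = 0
    · simp [hpar]
    · rw [dif_neg hpar, dif_neg hpar]
      have h2 : (p+2) / 2 = p / 2 + 1 := by omega
      rw [h2]
      by_cases hlt : p / 2 < vs.length
      · rw [dif_pos hlt, dif_pos (by simp only [List.length_cons]; omega)]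
        simp
      · rw [dif_neg hlt, dif_neg (by simp only [List.length_cons]; omega)]

theorem length_splitP_false : ∀ (l : List Int), (splitP false l).length = l.length / 2
  | [] => by simp [splitP]
  | [_] => by simp [splitP]
  | _ :: _ :: xs => by
    simp only [splitP, List.length_cons]
    rw [length_splitP_false xs]; omega

theorem getElem_splitP_false : ∀ (l : List Int) (k : Nat) (hk : k < (splitP false l).length),
    (splitP false l)[k] = l[2 * k + 1]'(by
      have := length_splitP_false l; omega)
  | _ :: _ :: xs, 0, _ => by simp [splitP]
  | x :: y :: xs, k+1, hk => by
    have := getElem_splitP_false xs k (by simpa [splitP] using hk)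
    simp only [splitP, List.getElem_cons_succ]
    rw [this]
    simp only [show 2 * (k+1) = (2*k+1) + 1 from by omega,
      List.getElem_cons_succ]

theorem getElem_enumerate (l : List Int) : ∀ (s : Int) (p : Nat) (hp : p < l.length),
    (PySem.List.enumerate l s)[p]'(by simpa using hp) = (s + p, l[p]) := by
  induction l with
  | nil => intro s p hp; simp at hp
  | cons x xs ih =>
    intro s p hp
    simp only [PySem.List.enumerate_cons]
    cases p with
    | zero => simp
    | succ p =>
      have := ih (s+1) p (by simpa using hp)
      simp only [List.getElem_cons_succ]
      rw [this]
      simp only [Prod.mk.injEq]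
      exact ⟨by push_cast; ring, trivial⟩

-- B equals setOdds of the reversed odd-position elements
theorem alt_eq_setOdds (l : List Int) :
    flip_half_alt l = setOdds l ((splitP false l).reverse) := by
  apply List.ext_getElem
  · simp [flip_half_alt, length_setOdds]
  · intro p hp _
    have hpl : p < l.length := by simpa [flip_half_alt] using hp
    simp only [flip_half_alt, List.getElem_map]
    rw [getElem_enumerate l 0 p hpl]
    rw [getElem_setOdds l _ p hpl]
    have hmod : PySem.Int.mod ((0:Int) + (p:Int)) 2 = ((p % 2 : Nat) : Int) := by
      rw [zero_add]; exact_mod_cast PySem.Int.mod_natCast p 2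
    rw [hmod]
    by_cases hpar : p % 2 = 0
    · rw [dif_pos hpar, hpar]
      simp
    · rw [dif_neg hpar]
      have hp2 : p % 2 = 1 := by omega
      rw [hp2, if_neg (by simp)]
      have hlen2 : (splitP false l).length = l.length / 2 := length_splitP_false l
      have hlt : p / 2 < ((splitP false l).reverse).length := by
        simp [hlen2]; omega
      rw [dif_pos hlt]
      rw [List.getElem_reverse]
      rw [getElem_splitP_false l _ (by
        have := hlt; simp only [List.length_reverse] at this; omega)]
      -- B's index:  lastOdd + 1 - p  =  l.length - l.length % 2 - p
      have hm : PySem.Int.mod ((l.length : Int)) 2 = ((l.length % 2 : Nat) : Int) := by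
        exact_mod_cast PySem.Int.mod_natCast l.length 2
      have hidx : ((l.length : Int) - 1 - PySem.Int.mod (l.length : Int) 2 + 1 - (0 + (p:Int)))
          = ((2 * ((splitP false l).length - 1 - p / 2) + 1 : Nat) : Int) := by
        rw [hm, hlen2]
        omega
      rw [hidx, PySem.List.pyGetD_natCast,
        List.getD_eq_getElem _ _ (by rw [hlen2] at *; omega)]

-- ===== VERDICT (by name: the statement is the Claim_ definition above) =====
theorem flip_half_spec : Claim_equal_flip_half := by
  intro liste _
  simp only [Spec_flip_half, flip_half]
  rw [flipLoop1_eq, if_pos (by norm_num : 0 % 2 = 0)]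
  simp only [List.drop_zero, List.nil_append]
  rw [flipLoop2_eq _ _ _ (le_refl _), List.take_length, List.nil_append,
    flipLoop3_eq, List.take_zero, List.drop_zero, List.nil_append]
  rw [show ((0 % 2 == 0) : Bool) = true from rfl]
  rw [alt_eq_setOdds]
  exact sb_eq_setOdds liste (splitP false liste) rfl
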